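-- pv_equiv track=rewrite | github.com/combiJihoon/AlgorithmStudy | programmers/end-to-end.py | solution
-- ===== SOURCE A (Python) =====
-- def solution(n, words):
--     words_dict = dict()
--     prev = words[0]
--     words_dict[words[0]] = 1
--
--     turn, num = 1, 2
--     for word in words[1:]:
--         answer = [num, turn]
--         if prev[-1] != word[0] or (word in words_dict):
--             return answer
--
--         words_dict[word] = 1
--         prev = word
--
--         if num == n:
--             turn += 1
--             num = 1
--         else:
--             num += 1
--
--     return [0, 0]
-- ===== SOURCE B (Python) =====
-- def solution(n, words):
--     L = len(words)
--     seen = set()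
--     dup = L
--     for i, w in enumerate(words):
--         if w in seen:
--             dup = i
--             break
--         seen.add(w)
--     brk = L
--     for i in range(1, min(dup + 1, L)):
--         if words[i - 1][-1] != words[i][0]:
--             brk = i
--             break
--     i = min(dup, brk)
--     if i == L:
--         return [0, 0]
--     return [i % n + 1, i // n + 1]
-- ===== Notes on version B (the rewrite author's own statement) =====
-- stated objective: alternative
-- what changed: B replaces A's single fused pass with maintained turn/num counters and a seen-dict by two staged scans -- one for the first repeated word, one for the first broken last-letter/first-letter link, stopped at the repeat -- then takes the minimum index and computes the answer in closed form with divmod.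
-- intended difference: For n = 1 (a one-player game) with a chain violation at index i, A returns [i+1, 1] (a player number exceeding n, an artefact of its counter starting at 2 and never hitting n=1), while B returns the intended [1, i+1]: player 1 loses on turn i+1. — e.g. on solution(1, ["ab", "cd"]): A returns [2, 1], B returns [1, 2]
-- outside the precondition, e.g. on solution(0, ['ab', 'xx']): A returns [2, 1], B raises ZeroDivisionError; on solution(-2, ['ab', 'xx']): A returns [2, 1], B returns [0, 0]
import Mathlib
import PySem

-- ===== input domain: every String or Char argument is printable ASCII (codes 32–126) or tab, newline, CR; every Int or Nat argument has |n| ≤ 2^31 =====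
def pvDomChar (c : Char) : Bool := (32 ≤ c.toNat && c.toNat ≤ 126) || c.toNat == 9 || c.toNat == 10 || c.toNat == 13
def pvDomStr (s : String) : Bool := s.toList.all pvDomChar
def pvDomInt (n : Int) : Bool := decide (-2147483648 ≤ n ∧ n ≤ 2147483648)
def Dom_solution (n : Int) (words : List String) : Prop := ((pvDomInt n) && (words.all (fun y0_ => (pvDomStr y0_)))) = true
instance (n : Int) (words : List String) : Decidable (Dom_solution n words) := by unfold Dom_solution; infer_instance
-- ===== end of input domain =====

-- B replaces A's fused pass with maintained turn/num counters and a seen-dict by two staged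
-- scans (first duplicate, first broken link), a minimum, and a closed-form divmod answer.


-- ===== PORT A =====
-- A's loop: for word in words[1:], with maintained prev, seen-dict, and counters turn/num.
def solLoopA (n : Int) (prev : String) (d : PySem.Dict String Int) (turn num : Int) :
    List String → List Int
  | [] => [0, 0]
  | word :: rest =>
      if PySem.Str.pyGet? prev (-1) ≠ PySem.Str.pyGet? word 0 ∨ d.contains word then
        [num, turn]
      else
        if num = n then
          solLoopA n word (d.insert word 1) (turn + 1) 1 rest
        else
          solLoopA n word (d.insert word 1) turn (num + 1) rest

def solution (n : Int) (words : List String) : List Int :=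
  match words with
  | [] => []  -- Python raises IndexError on words[0]; excluded by Pre_solution
  | w :: rest => solLoopA n w ((PySem.Dict.empty).insert w 1) 1 2 rest

-- ===== PORT B =====
-- B's first staged scan: index of the first word already seen, else len(words).
def dupLoop (L : Int) (seen : PySem.Set String) (i : Int) : List String → Int
  | [] => L
  | w :: rest =>
      if PySem.Set.contains seen w then i else dupLoop L (PySem.Set.add seen w) (i + 1) rest

-- B's second staged scan: for i in range(1, min(dup+1, L)), first i with words[i-1][-1] != words[i][0], else L.
def brkLoop (words : List String) (L : Int) : List Int → Int
  | [] => L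
  | i :: rest =>
      -- indices from the range are in bounds, so Python's words[i-1]/words[i] is exactly getD
      if PySem.Str.pyGet? (words.getD (i - 1).toNat "") (-1) ≠
         PySem.Str.pyGet? (words.getD i.toNat "") 0 then i
      else brkLoop words L rest

def solution_alt (n : Int) (words : List String) : List Int :=
  let L : Int := words.length
  let dup := dupLoop L PySem.Set.empty 0 words
  let brk := brkLoop words L (PySem.List.pyRange 1 (min (dup + 1) L) 1)
  let i := min dup brk
  if i = L then [0, 0]
  else [PySem.Int.mod i n + 1, PySem.Int.floordiv i n + 1]

-- ===== PRECONDITION & SPEC =====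
-- Pre_ excludes the inputs on which A raises: the empty list (IndexError on words[0]) and
-- lists where an empty-string word is reached before the chain breaks (IndexError on
-- prev[-1]/word[0]); it also excludes n <= 0, outside the game's natural domain of player
-- counts (there B's i % n either raises ZeroDivisionError at n = 0 or follows Python's
-- negative-divisor floor rules at n < 0 while A returns an accidental counter value).
def Pre_solution (n : Int) (words : List String) : Prop :=
  1 ≤ n ∧ words ≠ [] ∧
  ∀ i : Fin words.length, 1 ≤ i.val →
    (words.getD (i.val - 1) "" = "" ∨ words.getD i.val "" = "") →
    ∃ j : Fin words.length, 1 ≤ j.val ∧ j.val < i.val ∧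
      (PySem.Str.pyGet? (words.getD (j.val - 1) "") (-1) ≠
         PySem.Str.pyGet? (words.getD j.val "") 0 ∨
       words.getD j.val "" ∈ words.take j.val)
instance (n : Int) (words : List String) : Decidable (Pre_solution n words) := by
  unfold Pre_solution
  exact instDecidableAnd (dq := instDecidableAnd (dq := inferInstance))

def pvWitness_solution : Int × List String := (3, ["ab", "bc", "cd"])

-- For n = 1 with a chain violation at index i, A returns [i+1, 1] (a player number exceeding n,
-- an artefact of its counter starting at 2 and never hitting n = 1), while B returns the
-- intended [1, i+1]: player 1 loses on turn i+1.  The violation condition is a closed-form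
-- property of the input list: some adjacent pair fails the last-letter/first-letter link, or
-- some word repeats.
def D_solution (n : Int) (words : List String) : Prop :=
  n = 1 ∧ (¬ List.IsChain (fun a b => PySem.Str.pyGet? a (-1) = PySem.Str.pyGet? b 0) words ∨
           ¬ words.Nodup)
instance (n : Int) (words : List String) : Decidable (D_solution n words) := by
  unfold D_solution; infer_instance

def Spec_solution (n : Int) (words : List String) (out : List Int) : Prop :=
  ¬ D_solution n words → out = solution_alt n words
instance (n : Int) (words : List String) (out : List Int) : Decidable (Spec_solution n words out) := by
  unfold Spec_solution; infer_instance

def pvDiffWitness_solution : Int × List String := (1, ["ab", "cd"])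
def pvDiffWitnessOut_solution : (List Int) × (List Int) := ([2, 1], [1, 2])

-- ===== CLAIM (what is proved, stated in full; the proofs are below) =====
def Claim_unchanged_solution : Prop := ∀ (n : Int) (words : List String), Dom_solution n words → Pre_solution n words → Spec_solution n words (solution n words)
def Claim_changed_solution : Prop := Dom_solution (pvDiffWitness_solution.1) (pvDiffWitness_solution.2) ∧ Pre_solution (pvDiffWitness_solution.1) (pvDiffWitness_solution.2) ∧ D_solution (pvDiffWitness_solution.1) (pvDiffWitness_solution.2) ∧ solution (pvDiffWitness_solution.1) (pvDiffWitness_solution.2) = pvDiffWitnessOut_solution.1 ∧ solution_alt (pvDiffWitness_solution.1) (pvDiffWitness_solution.2) = pvDiffWitnessOut_solution.2 ∧ pvDiffWitnessOut_solution.1 ≠ pvDiffWitnessOut_solution.2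
def Claim_exact_solution : Prop := ∀ (n : Int) (words : List String), Dom_solution n words → Pre_solution n words → D_solution n words → solution n words ≠ solution_alt n words

-- ===== LEMMAS AND PROOFS =====

-- Proof-side REFERENCE loop: one pass with an index, from which both A's counter pass and
-- B's staged scans are derived.
def refLoop (n : Int) (prev : String) (seen : PySem.Set String) (i : Int) :
    List String → List Int
  | [] => [0, 0]
  | word :: rest =>
      if PySem.Str.pyGet? prev (-1) ≠ PySem.Str.pyGet? word 0 ∨ PySem.Set.contains seen word then
        [PySem.Int.mod i n + 1, PySem.Int.floordiv i n + 1]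
      else
        refLoop n word (PySem.Set.add seen word) (i + 1) rest

-- Proof-side helper: the point at which the shared break condition first fires.
def chainStops (prev : String) (seen : List String) : List String → Bool
  | [] => false
  | w :: rest =>
      if PySem.Str.pyGet? prev (-1) ≠ PySem.Str.pyGet? w 0 ∨ w ∈ seen then true
      else chainStops w (w :: seen) rest

-- chainStops never fires exactly when the chain links up and nothing repeats.
lemma chainStops_eq_false_iff :
    ∀ (rest : List String) (prev : String) (seen : List String),
      chainStops prev seen rest = false ↔
        (List.IsChain (fun a b => PySem.Str.pyGet? a (-1) = PySem.Str.pyGet? b 0) (prev :: rest) ∧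
         rest.Nodup ∧ ∀ x ∈ rest, x ∉ seen) := by
  intro rest
  induction rest with
  | nil =>
    intro prev seen
    simp [chainStops]
  | cons w rs ih =>
    intro prev seen
    simp only [chainStops]
    by_cases hc : PySem.Str.pyGet? prev (-1) ≠ PySem.Str.pyGet? w 0 ∨ w ∈ seen
    · rw [if_pos hc]
      simp only [List.isChain_cons_cons, List.nodup_cons, List.mem_cons]
      constructor
      · intro h; cases h
      · rintro ⟨⟨hlink, -⟩, -, hnotin⟩
        rcases hc with h | h
        · exact absurd hlink h
        · exact absurd h (hnotin w (Or.inl rfl))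
    · rw [if_neg hc]
      push Not at hc
      rw [ih w (w :: seen)]
      simp only [List.isChain_cons_cons, List.nodup_cons, List.mem_cons]
      constructor
      · rintro ⟨hchain, hnd, hnotin⟩
        refine ⟨⟨hc.1, hchain⟩, ⟨fun hw => (hnotin w hw (Or.inl rfl)), hnd⟩, ?_⟩
        rintro x (rfl | hx)
        · exact hc.2
        · exact fun hxs => hnotin x hx (Or.inr hxs)
      · rintro ⟨⟨-, hchain⟩, ⟨hwrs, hnd⟩, hnotin⟩
        refine ⟨hchain, hnd, ?_⟩
        rintro x hx (rfl | hxs)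
        · exact hwrs hx
        · exact hnotin x (Or.inr hx) hxs

-- Inserting the current word keeps the dict/seen-list membership correspondence.
lemma memA_step (d : PySem.Dict String Int) (word : String) (seen : List String)
    (hmem : ∀ w, d.contains w = decide (w ∈ seen)) :
    ∀ w, (d.insert word (1:Int)).contains w = decide (w ∈ word :: seen) := by
  intro w
  rw [PySem.Dict.contains_insert]
  simp [hmem w, List.mem_cons, Bool.beq_eq_decide_eq]

-- Adding the current word keeps the set/seen-list membership correspondence.
lemma memB_step (s : PySem.Set String) (word : String) (seen : List String)
    (hmem : ∀ w, PySem.Set.contains s w = decide (w ∈ seen)) :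
    ∀ w, PySem.Set.contains (PySem.Set.add s word) w = decide (w ∈ word :: seen) := by
  intro w
  have hs : w ∈ s ↔ w ∈ seen := by
    rw [← PySem.Set.contains_iff, hmem w, decide_eq_true_iff]
  rw [Bool.eq_iff_iff, PySem.Set.contains_iff, PySem.Set.mem_add, decide_eq_true_iff,
    List.mem_cons, hs]
  tauto

-- A's dict and the reference set contain the same words whenever both track the same seen-list.
lemma memAB (d : PySem.Dict String Int) (s : PySem.Set String) (word : String)
    (hd : ∀ w, d.contains w = PySem.Set.contains s w) :
    ∀ w, (d.insert word (1:Int)).contains w = PySem.Set.contains (PySem.Set.add s word) w := by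
  intro w
  rw [PySem.Dict.contains_insert, hd w, Bool.eq_iff_iff]
  simp only [Bool.or_eq_true, PySem.Set.contains_iff, PySem.Set.mem_add, beq_iff_eq]
  tauto

lemma memA_init (w : String) :
    ∀ x, ((PySem.Dict.empty).insert w (1:Int)).contains x = decide (x ∈ [w]) := by
  intro x
  simp [PySem.Dict.contains_insert, PySem.Dict.contains_empty, Bool.beq_eq_decide_eq]

lemma memB_init (w : String) :
    ∀ x, PySem.Set.contains (PySem.Set.ofList [w]) x = decide (x ∈ [w]) := by
  intro x
  rw [Bool.eq_iff_iff, PySem.Set.contains_iff, PySem.Set.mem_ofList, decide_eq_true_iff]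

lemma memAB_init (w : String) :
    ∀ x, ((PySem.Dict.empty).insert w (1:Int)).contains x =
      PySem.Set.contains (PySem.Set.ofList [w]) x := by
  intro x; rw [memA_init w x, memB_init w x]

-- Main correspondence for n ≥ 2: A's counters (turn, num) are the closed form of ref's index i.
lemma loopAB (n : Int) (hn : 2 ≤ n) :
    ∀ (rest : List String) (prev : String) (d : PySem.Dict String Int) (s : PySem.Set String)
      (i : Int),
      (∀ w, d.contains w = PySem.Set.contains s w) →
      solLoopA n prev d (PySem.Int.floordiv i n + 1) (PySem.Int.mod i n + 1) rest =
        refLoop n prev s i rest := by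
  intro rest
  induction rest with
  | nil => intro prev d s i hmem; rfl
  | cons word rest ih =>
    intro prev d s i hmem
    have hp : (0:Int) < n := by omega
    simp only [solLoopA, refLoop]
    rw [hmem word, PySem.Int.mod_eq_emod_of_pos hp, PySem.Int.floordiv_eq_ediv_of_pos hp]
    by_cases hc : PySem.Str.pyGet? prev (-1) ≠ PySem.Str.pyGet? word 0 ∨ PySem.Set.contains s word
    · rw [if_pos hc, if_pos hc]
    · rw [if_neg hc, if_neg hc]
      have hmem' := memAB d s word hmem
      by_cases hnum : i % n + 1 = n
      · rw [if_pos hnum]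
        have h1 : i + 1 = n * (i / n + 1) := by
          have := Int.mul_ediv_add_emod i n; linarith
        have hmod : PySem.Int.mod (i + 1) n = 0 := by
          rw [PySem.Int.mod_eq_emod_of_pos hp, h1]; exact Int.mul_emod_right _ _
        have hdiv : PySem.Int.floordiv (i + 1) n = i / n + 1 := by
          rw [PySem.Int.floordiv_eq_ediv_of_pos hp, h1]
          exact Int.mul_ediv_cancel_left _ (by omega)
        have h := ih word (d.insert word 1) (PySem.Set.add s word) (i + 1) hmem'
        rw [hmod, hdiv] at h
        simpa using h
      · rw [if_neg hnum]
        have hmlt := Int.emod_lt_of_pos i hp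
        have hmge := Int.emod_nonneg i (by omega : n ≠ 0)
        have h1 : i + 1 = i % n + 1 + n * (i / n) := by
          have := Int.mul_ediv_add_emod i n; linarith
        have hmod : PySem.Int.mod (i + 1) n = i % n + 1 := by
          rw [PySem.Int.mod_eq_emod_of_pos hp, h1, Int.add_mul_emod_self_left]
          exact Int.emod_eq_of_lt (by omega) (by omega)
        have hdiv : PySem.Int.floordiv (i + 1) n = i / n := by
          rw [PySem.Int.floordiv_eq_ediv_of_pos hp, h1,
            Int.add_mul_ediv_left _ _ (by omega : n ≠ 0),
            Int.ediv_eq_zero_of_lt (by omega) (by omega)]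
          ring
        have h := ih word (d.insert word 1) (PySem.Set.add s word) (i + 1) hmem'
        rw [hmod, hdiv] at h
        exact h

-- If the chain never stops, A's loop finishes with [0, 0].
lemma loopA_noStop (n : Int) :
    ∀ (rest : List String) (prev : String) (d : PySem.Dict String Int) (seen : List String)
      (turn num : Int),
      (∀ w, d.contains w = decide (w ∈ seen)) →
      chainStops prev seen rest = false →
      solLoopA n prev d turn num rest = [0, 0] := by
  intro rest
  induction rest with
  | nil => intro prev d seen turn num hmem hstop; rfl
  | cons word rest ih =>
    intro prev d seen turn num hmem hstop
    simp only [chainStops] at hstop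
    by_cases hc : PySem.Str.pyGet? prev (-1) ≠ PySem.Str.pyGet? word 0 ∨ word ∈ seen
    · rw [if_pos hc] at hstop; cases hstop
    · rw [if_neg hc] at hstop
      have hcA : ¬ (PySem.Str.pyGet? prev (-1) ≠ PySem.Str.pyGet? word 0 ∨ d.contains word) := by
        rw [hmem word]; simpa using hc
      simp only [solLoopA]
      rw [if_neg hcA]
      by_cases hnum : num = n
      · rw [if_pos hnum]; exact ih word _ (word :: seen) _ _ (memA_step d word seen hmem) hstop
      · rw [if_neg hnum]; exact ih word _ (word :: seen) _ _ (memA_step d word seen hmem) hstop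

-- If the chain never stops, the reference loop finishes with [0, 0].
lemma refLoop_noStop (n : Int) :
    ∀ (rest : List String) (prev : String) (s : PySem.Set String) (seen : List String) (i : Int),
      (∀ w, PySem.Set.contains s w = decide (w ∈ seen)) →
      chainStops prev seen rest = false →
      refLoop n prev s i rest = [0, 0] := by
  intro rest
  induction rest with
  | nil => intro prev s seen i hmem hstop; rfl
  | cons word rest ih =>
    intro prev s seen i hmem hstop
    simp only [chainStops] at hstop
    by_cases hc : PySem.Str.pyGet? prev (-1) ≠ PySem.Str.pyGet? word 0 ∨ word ∈ seen
    · rw [if_pos hc] at hstop; cases hstop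
    · rw [if_neg hc] at hstop
      have hcB : ¬ (PySem.Str.pyGet? prev (-1) ≠ PySem.Str.pyGet? word 0 ∨
          PySem.Set.contains s word) := by
        rw [hmem word]; simpa using hc
      simp only [refLoop]
      rw [if_neg hcB]
      exact ih word _ (word :: seen) _ (memB_step s word seen hmem) hstop

-- n = 1, chain stops: A returns [m, turn] with 2 ≤ m (its num counter never resets).
lemma loopA_stop_one :
    ∀ (rest : List String) (prev : String) (d : PySem.Dict String Int) (seen : List String)
      (turn num : Int),
      (∀ w, d.contains w = decide (w ∈ seen)) →
      chainStops prev seen rest = true →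
      2 ≤ num →
      ∃ m, 2 ≤ m ∧ solLoopA 1 prev d turn num rest = [m, turn] := by
  intro rest
  induction rest with
  | nil =>
    intro prev d seen turn num hmem hstop hnum
    cases hstop
  | cons word rest ih =>
    intro prev d seen turn num hmem hstop hnum
    simp only [chainStops] at hstop
    simp only [solLoopA]
    by_cases hc : PySem.Str.pyGet? prev (-1) ≠ PySem.Str.pyGet? word 0 ∨ word ∈ seen
    · have hcA : PySem.Str.pyGet? prev (-1) ≠ PySem.Str.pyGet? word 0 ∨ d.contains word := by
        rw [hmem word]; simpa using hc
      rw [if_pos hcA]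
      exact ⟨num, hnum, rfl⟩
    · rw [if_neg hc] at hstop
      have hcA : ¬ (PySem.Str.pyGet? prev (-1) ≠ PySem.Str.pyGet? word 0 ∨ d.contains word) := by
        rw [hmem word]; simpa using hc
      rw [if_neg hcA, if_neg (by omega : ¬ num = 1)]
      exact ih word _ (word :: seen) turn (num + 1) (memA_step d word seen hmem) hstop (by omega)

-- n = 1, chain stops: the reference loop returns [1, j] for some j (i % 1 = 0).
lemma refLoop_stop_one :
    ∀ (rest : List String) (prev : String) (s : PySem.Set String) (seen : List String) (i : Int),
      (∀ w, PySem.Set.contains s w = decide (w ∈ seen)) →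
      chainStops prev seen rest = true →
      ∃ j, refLoop 1 prev s i rest = [1, j] := by
  intro rest
  induction rest with
  | nil =>
    intro prev s seen i hmem hstop
    cases hstop
  | cons word rest ih =>
    intro prev s seen i hmem hstop
    simp only [chainStops] at hstop
    simp only [refLoop]
    by_cases hc : PySem.Str.pyGet? prev (-1) ≠ PySem.Str.pyGet? word 0 ∨ word ∈ seen
    · have hcB : PySem.Str.pyGet? prev (-1) ≠ PySem.Str.pyGet? word 0 ∨
          PySem.Set.contains s word := by
        rw [hmem word]; simpa using hc
      rw [if_pos hcB]
      refine ⟨PySem.Int.floordiv i 1 + 1, ?_⟩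
      have : PySem.Int.mod i 1 = 0 := by
        rw [PySem.Int.mod_eq_emod_of_pos (by omega)]; exact Int.emod_one i
      rw [this]
      norm_num
    · rw [if_neg hc] at hstop
      have hcB : ¬ (PySem.Str.pyGet? prev (-1) ≠ PySem.Str.pyGet? word 0 ∨
          PySem.Set.contains s word) := by
        rw [hmem word]; simpa using hc
      rw [if_neg hcB]
      exact ih word _ (word :: seen) (i + 1) (memB_step s word seen hmem) hstop

-- dupLoop never returns an index below min i L.
lemma dupLoop_ge :
    ∀ (rest : List String) (seen : PySem.Set String) (i L : Int),
      min i L ≤ dupLoop L seen i rest := by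
  intro rest
  induction rest with
  | nil => intro seen i L; simp [dupLoop]
  | cons w rs ih =>
    intro seen i L
    simp only [dupLoop]
    by_cases hc : PySem.Set.contains seen w
    · rw [if_pos hc]; exact min_le_left i L
    · rw [if_neg hc]
      calc min i L ≤ min (i + 1) L := by
            rcases le_total (i + 1) L with h | h <;> rcases le_total i L with h' | h' <;>
              simp [min_def, *] <;> omega
        _ ≤ dupLoop L (PySem.Set.add seen w) (i + 1) rs := ih _ _ _

-- The staged scans of B compute exactly the reference loop: the break point is the minimum of
-- the first-duplicate index and the first-broken-link index (the link scan stops at the repeat).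
lemma stageLoop (n : Int) :
    ∀ (rest : List String) (prev : String) (seen : PySem.Set String) (iN : Nat)
      (words : List String),
      1 ≤ iN → words.drop (iN - 1) = prev :: rest →
      refLoop n prev seen (iN : Int) rest =
        (let L : Int := words.length
         let dup := dupLoop L seen (iN : Int) rest
         let m := min dup (brkLoop words L (PySem.List.pyRange (iN : Int) (min (dup + 1) L) 1))
         if m = L then [0, 0]
         else [PySem.Int.mod m n + 1, PySem.Int.floordiv m n + 1]) := by
  intro rest
  induction rest with
  | nil =>
    intro prev seen iN words h1 hdrop
    have hlen : words.length = iN := by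
      have := congrArg List.length hdrop
      simp [List.length_drop] at this
      omega
    have hL : (words.length : Int) = (iN : Int) := by exact_mod_cast hlen
    have hdup : dupLoop ((words.length : Int)) seen (iN : Int) [] = (words.length : Int) := rfl
    have hrange : PySem.List.pyRange (iN : Int)
        (min ((words.length : Int) + 1) (words.length : Int)) 1 = [] := by
      rw [min_eq_right (by omega), hL, PySem.List.pyRange_one]
      simp
    have hbrk : brkLoop words ((words.length : Int)) [] = (words.length : Int) := rfl
    simp only [refLoop, hdup, hrange, hbrk, min_self]
    simp
  | cons w rs ih =>
    intro prev seen iN words h1 hdrop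
    have hlen : words.length = iN + 1 + rs.length := by
      have := congrArg List.length hdrop
      simp [List.length_drop] at this
      omega
    have hiL : (iN : Int) < (words.length : Int) := by exact_mod_cast (by omega : iN < words.length)
    -- index facts
    have hprev : words[iN - 1]? = some prev := by
      have : (words.drop (iN - 1))[0]? = some prev := by rw [hdrop]; rfl
      rwa [List.getElem?_drop, Nat.add_zero] at this
    have hw : words[iN]? = some w := by
      have : (words.drop (iN - 1))[1]? = some w := by rw [hdrop]; rfl
      rw [List.getElem?_drop] at this
      rwa [(by omega : iN - 1 + 1 = iN)] at this
    have hgetPrev : words.getD ((iN : Int) - 1).toNat "" = prev := by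
      have : ((iN : Int) - 1).toNat = iN - 1 := by omega
      rw [this, List.getD_eq_getElem?_getD, hprev]; rfl
    have hgetW : words.getD ((iN : Int)).toNat "" = w := by
      have : ((iN : Int)).toNat = iN := by omega
      rw [this, List.getD_eq_getElem?_getD, hw]; rfl
    simp only [refLoop, dupLoop]
    by_cases hc2 : PySem.Set.contains seen w
    · -- duplicate at iN: dup = iN, link scan sees only the pair at iN
      rw [if_pos hc2]
      have hrange : PySem.List.pyRange (iN : Int)
          (min ((iN : Int) + 1) ((words.length : Int))) 1 =
          (iN : Int) :: PySem.List.pyRange ((iN : Int) + 1)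
            (min ((iN : Int) + 1) ((words.length : Int))) 1 :=
        PySem.List.pyRange_one_cons (by omega)
      have hrange' : PySem.List.pyRange ((iN : Int) + 1)
          (min ((iN : Int) + 1) ((words.length : Int))) 1 = [] := by
        rw [PySem.List.pyRange_one]
        rw [(by omega : (min ((iN : Int) + 1) ((words.length : Int)) - ((iN : Int) + 1)).toNat = 0)]
        simp
      rw [hrange, hrange']
      simp only [brkLoop, hgetPrev, hgetW]
      by_cases hc1 : PySem.Str.pyGet? prev (-1) ≠ PySem.Str.pyGet? w 0
      · rw [if_pos (Or.inl hc1), if_pos hc1, min_self,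
          if_neg (by omega : ¬ (iN : Int) = (words.length : Int))]
      · rw [if_pos (Or.inr hc2), if_neg hc1, min_eq_left (by omega),
          if_neg (by omega : ¬ (iN : Int) = (words.length : Int))]
    · rw [if_neg hc2]
      have hdup' : (iN : Int) + 1 ≤
          dupLoop ((words.length : Int)) (PySem.Set.add seen w) ((iN : Int) + 1) rs := by
        have := dupLoop_ge rs (PySem.Set.add seen w) ((iN : Int) + 1) ((words.length : Int))
        have hle : (iN : Int) + 1 ≤ (words.length : Int) := by omega
        rw [min_eq_left hle] at this
        exact this
      have hrange : PySem.List.pyRange (iN : Int)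
          (min (dupLoop ((words.length : Int)) (PySem.Set.add seen w) ((iN : Int) + 1) rs + 1)
            ((words.length : Int))) 1 =
          (iN : Int) :: PySem.List.pyRange ((iN : Int) + 1)
            (min (dupLoop ((words.length : Int)) (PySem.Set.add seen w) ((iN : Int) + 1) rs + 1)
              ((words.length : Int))) 1 :=
        PySem.List.pyRange_one_cons (by
          simp only [lt_min_iff]
          omega)
      rw [hrange]
      simp only [brkLoop, hgetPrev, hgetW]
      by_cases hc1 : PySem.Str.pyGet? prev (-1) ≠ PySem.Str.pyGet? w 0
      · -- broken link at iN: brk = iN ≤ dup, min = iN < L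
        rw [if_pos (Or.inl hc1), if_pos hc1, min_eq_right (by omega),
          if_neg (by omega : ¬ (iN : Int) = (words.length : Int))]
      · -- neither fires: all loops step in sync
        rw [if_neg (by tauto), if_neg hc1]
        have hdrop' : words.drop ((iN + 1) - 1) = w :: rs := by
          have h3 := congrArg (List.drop 1) hdrop
          rw [List.drop_drop] at h3
          simp only [List.drop_succ_cons, List.drop_zero] at h3
          rwa [(by omega : iN - 1 + 1 = (iN + 1) - 1)] at h3
        have h := ih w (PySem.Set.add seen w) (iN + 1) words (by omega) hdrop'
        push_cast at h
        exact h

-- B's port equals the reference loop on a nonempty list.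
lemma alt_eq_ref (n : Int) (w : String) (rest : List String) :
    solution_alt n (w :: rest) = refLoop n w (PySem.Set.ofList [w]) 1 rest := by
  have h0 : PySem.Set.contains PySem.Set.empty w = false := by
    rw [Bool.eq_false_iff]
    intro h
    rw [PySem.Set.contains_iff] at h
    simp [PySem.Set.empty] at h
  have h := stageLoop n rest w (PySem.Set.ofList [w]) 1 (w :: rest) (le_refl 1) (by simp)
  simp only [Nat.cast_one] at h
  rw [show (PySem.Set.ofList [w]) = PySem.Set.add PySem.Set.empty w from rfl] at h ⊢
  simp only [solution_alt, dupLoop, h0, if_false, Bool.false_eq_true]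
  rw [h]
  norm_num

-- ===== VERDICT (by name: the statement is the Claim_ definition above) =====
theorem solution_spec : Claim_unchanged_solution := by
  intro n words hdom hpre hnd
  obtain ⟨hn, hne, -⟩ := hpre
  cases words with
  | nil => exact absurd rfl hne
  | cons w rest =>
    show solution n (w :: rest) = solution_alt n (w :: rest)
    rw [alt_eq_ref]
    show solLoopA n w _ 1 2 rest = refLoop n w _ 1 rest
    by_cases h1 : n = 1
    · subst h1
      have hok : List.IsChain (fun a b => PySem.Str.pyGet? a (-1) = PySem.Str.pyGet? b 0)
          (w :: rest) ∧ (w :: rest).Nodup := by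
        by_contra h
        exact hnd ⟨rfl, by tauto⟩
      have hstop : chainStops w [w] rest = false := by
        rw [chainStops_eq_false_iff]
        obtain ⟨hchain, hnd'⟩ := hok
        rw [List.nodup_cons] at hnd'
        exact ⟨hchain, hnd'.2, fun x hx hmem => by
          simp only [List.mem_singleton] at hmem
          exact hnd'.1 (hmem ▸ hx)⟩
      rw [loopA_noStop 1 rest w _ [w] 1 2 (memA_init w) hstop,
        refLoop_noStop 1 rest w _ [w] 1 (memB_init w) hstop]
    · have hn2 : (2:Int) ≤ n := by omega
      have hp : (0:Int) < n := by omega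
      have hm1 : PySem.Int.mod 1 n = 1 := by
        rw [PySem.Int.mod_eq_emod_of_pos hp]
        exact Int.emod_eq_of_lt (by omega) (by omega)
      have hd1 : PySem.Int.floordiv 1 n = 0 := by
        rw [PySem.Int.floordiv_eq_ediv_of_pos hp]
        exact Int.ediv_eq_zero_of_lt (by omega) (by omega)
      have h := loopAB n hn2 rest w ((PySem.Dict.empty).insert w 1) (PySem.Set.ofList [w]) 1
        (memAB_init w)
      rw [hm1, hd1] at h
      simpa using h

theorem solution_changed : Claim_changed_solution := by
  unfold Claim_changed_solution; decide

theorem solution_tight : Claim_exact_solution := by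
  intro n words hdom hpre hd
  obtain ⟨h1, hstop⟩ := hd
  subst h1
  cases words with
  | nil => simp [List.IsChain.nil] at hstop
  | cons w rest =>
    have hstop : chainStops w [w] rest = true := by
      rcases Bool.eq_false_or_eq_true (chainStops w [w] rest) with ht | hf
      · exact ht
      · rw [chainStops_eq_false_iff] at hf
        obtain ⟨hchain, hnd', hnotin⟩ := hf
        rcases hstop with h | h
        · exact absurd hchain h
        · refine absurd (List.nodup_cons.mpr ⟨?_, hnd'⟩) h
          intro hw
          exact hnotin w hw (List.mem_singleton.mpr rfl)
    obtain ⟨m, hm, hA⟩ := loopA_stop_one rest w _ [w] 1 2 (memA_init w) hstop (by omega)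
    obtain ⟨j, hB⟩ := refLoop_stop_one rest w _ [w] 1 (memB_init w) hstop
    rw [alt_eq_ref]
    show solLoopA 1 w _ 1 2 rest ≠ refLoop 1 w _ 1 rest
    rw [hA, hB]
    intro h
    have := List.head_eq_of_cons_eq h
    omega
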